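-- pv_equiv track=rewrite | github.com/eliahreeves/spice-to-sch | main.py | extract_io_from_spice
-- ===== SOURCE A (Python) =====
-- from typing import List, Tuple, NamedTuple
--
-- def extract_io_from_spice(content: List[str]) -> Tuple[List[str], List[str]]:
--     subckt_line = None
--
--     for line in content:
--         line = line.strip()
--         if line.lower().startswith(".subckt"):
--             subckt_line = line
--             break
--
--     if not subckt_line:
--         raise ValueError("No .subckt definition found in the SPICE file.")
--
--     tokens = subckt_line.split()
--     if len(tokens) < 3:
--         raise ValueError("Invalid format")
--
--     # subckt_name = tokens[1]
--     ports = tokens[2:]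
--
--     power_ground = {"VDD", "VCC", "VSS", "GND", "VGND", "VPWR", "VNB", "VPB"}
--
--     inputs: List[str] = []
--     outputs: List[str] = []
--     found_output = False
--
--     for port in reversed(ports):  # Start from the end
--         if port in power_ground:
--             found_output = True
--
--         if not found_output:
--             outputs.append(port)
--         else:
--             inputs.append(port)
--
--     inputs.reverse()  # Restore input order
--     outputs.reverse()
--     return (inputs, outputs)
-- ===== SOURCE B (Python) =====
-- from typing import List, Tuple
--
-- def extract_io_from_spice(content: List[str]) -> Tuple[List[str], List[str]]:
--     power_ground = {"VDD", "VCC", "VSS", "GND", "VGND", "VPWR", "VNB", "VPB"}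
--
--     subckt_line = next((l.strip() for l in content
--                         if l.strip().lower().startswith(".subckt")), None)
--     if subckt_line is None:
--         raise ValueError("No .subckt definition found in the SPICE file.")
--
--     tokens = subckt_line.split()
--     if len(tokens) < 3:
--         raise ValueError("Invalid format")
--
--     ports = tokens[2:]
--
--     # index just past the LAST power/ground token (0 if none): that token
--     # and everything before it are inputs, the rest are outputs.
--     split = 0
--     for i, port in enumerate(ports):
--         if port in power_ground:
--             split = i + 1
--
--     return (ports[:split], ports[split:])
-- ===== Notes on version B (the rewrite author's own statement) =====
-- stated objective: simpler
-- what changed: Replaces A's reversed-iteration loop that accumulates two lists under a found_output flag (plus two final reversals) with a single forward pass computing the index just past the last power/ground token, followed by two slices.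
import Mathlib
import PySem

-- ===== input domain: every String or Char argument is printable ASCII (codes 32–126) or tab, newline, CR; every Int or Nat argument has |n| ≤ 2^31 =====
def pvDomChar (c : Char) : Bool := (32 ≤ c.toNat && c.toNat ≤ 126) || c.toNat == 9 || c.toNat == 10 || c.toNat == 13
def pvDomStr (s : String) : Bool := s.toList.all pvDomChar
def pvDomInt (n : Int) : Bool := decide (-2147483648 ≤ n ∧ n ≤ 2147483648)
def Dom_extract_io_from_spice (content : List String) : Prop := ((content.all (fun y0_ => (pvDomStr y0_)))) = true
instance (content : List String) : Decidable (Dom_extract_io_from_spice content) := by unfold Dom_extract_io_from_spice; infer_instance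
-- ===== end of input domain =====

-- B replaces A's reverse flag-accumulation loop by computing the split point (just past the
-- last power/ground port) in one forward pass and slicing; objective: simpler, not faster.

-- ===== PORT A =====
def pvPG : List String := ["VDD", "VCC", "VSS", "GND", "VGND", "VPWR", "VNB", "VPB"]

def pvFindSubcktA : List String → Option String
  | [] => none
  | l :: rest =>
    let s := PySem.Str.strip l
    if PySem.Str.startswith (PySem.Str.lower s) ".subckt" then some s else pvFindSubcktA rest

def pvStepA (st : List String × List String × Bool) (port : String) : List String × List String × Bool :=
  let found := st.2.2 || pvPG.contains port
  if !found then (st.1, st.2.1 ++ [port], found) else (st.1 ++ [port], st.2.1, found)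

def extract_io_from_spice (content : List String) : List String × List String :=
  match pvFindSubcktA content with
  | none => ([], [])   -- Python raises ValueError here; excluded by Pre_
  | some subckt =>
    let tokens := PySem.Str.split₀ subckt
    if tokens.length < 3 then ([], [])   -- Python raises ValueError here; excluded by Pre_
    else
      let ports := PySem.List.slice tokens (some 2) none
      let r := ports.reverse.foldl pvStepA ([], [], false)
      (r.1.reverse, r.2.1.reverse)

-- ===== PORT B =====
def pvSubcktLineB (content : List String) : Option String :=
  (content.find? (fun l => PySem.Str.startswith (PySem.Str.lower (PySem.Str.strip l)) ".subckt")).map PySem.Str.strip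

def pvSplitB (ports : List String) : Int :=
  (PySem.List.enumerate ports 0).foldl (fun s ip => if pvPG.contains ip.2 then ip.1 + 1 else s) 0

def extract_io_from_spice_alt (content : List String) : List String × List String :=
  match pvSubcktLineB content with
  | none => ([], [])   -- Python raises ValueError here; excluded by Pre_
  | some subckt =>
    let tokens := PySem.Str.split₀ subckt
    if tokens.length < 3 then ([], [])   -- Python raises ValueError here; excluded by Pre_
    else
      let ports := PySem.List.slice tokens (some 2) none
      let split := pvSplitB ports
      (PySem.List.slice ports none (some split), PySem.List.slice ports (some split) none)

-- ===== PRECONDITION & SPEC =====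
-- Pre_ excludes exactly the inputs on which A raises ValueError: no line stripping to a
-- case-insensitive ".subckt" prefix, or that first such line having fewer than 3 tokens.
def Pre_extract_io_from_spice (content : List String) : Prop :=
  ((content.find? (fun l => PySem.Str.startswith (PySem.Str.lower (PySem.Str.strip l)) ".subckt")).elim
    false (fun l => 3 ≤ (PySem.Str.split₀ (PySem.Str.strip l)).length)) = true
instance (content : List String) : Decidable (Pre_extract_io_from_spice content) := by
  unfold Pre_extract_io_from_spice; infer_instance

def pvWitness_extract_io_from_spice : List String :=
  ["* inverter", ".SUBCKT inv A Y VGND VPWR"]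

def Spec_extract_io_from_spice (content : List String) (out : List String × List String) : Prop := out = extract_io_from_spice_alt content
instance (content : List String) (out : List String × List String) : Decidable (Spec_extract_io_from_spice content out) := by unfold Spec_extract_io_from_spice; infer_instance

-- ===== CLAIM (what is proved, stated in full; the proofs are below) =====
def Claim_equal_extract_io_from_spice : Prop := ∀ (content : List String), Dom_extract_io_from_spice content → Pre_extract_io_from_spice content → Spec_extract_io_from_spice content (extract_io_from_spice content)

-- ===== LEMMAS AND PROOFS =====

theorem pvFind_eq (content : List String) :
    pvFindSubcktA content = pvSubcktLineB content := by
  induction content with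
  | nil => rfl
  | cons l rest ih =>
    rw [show pvFindSubcktA (l :: rest)
        = (if PySem.Str.startswith (PySem.Str.lower (PySem.Str.strip l)) ".subckt"
           then some (PySem.Str.strip l) else pvFindSubcktA rest) from rfl]
    unfold pvSubcktLineB
    rw [List.find?_cons]
    cases h : PySem.Str.startswith (PySem.Str.lower (PySem.Str.strip l)) ".subckt" with
    | true => simp only [if_true, Option.map_some]
    | false =>
      simp only [Bool.false_eq_true, if_false]
      unfold pvSubcktLineB at ih
      exact ih

-- once the flag is set, every remaining port goes to inputs
theorem pvFoldT (ys ins outs : List String) :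
    ys.foldl pvStepA (ins, outs, true) = (ins ++ ys, outs, true) := by
  induction ys generalizing ins with
  | nil => simp
  | cons y ys ih =>
    have hstep : pvStepA (ins, outs, true) y = (ins ++ [y], outs, true) := by
      simp only [pvStepA, Bool.true_or, Bool.not_true, Bool.false_eq_true, if_false]
    rw [List.foldl_cons, hstep, ih, List.append_assoc, List.singleton_append]

-- closed form of A's reverse loop starting with the flag unset
theorem pvFoldF (ys ins outs : List String) :
    ys.foldl pvStepA (ins, outs, false) =
      (ins ++ ys.dropWhile (fun p => !pvPG.contains p),
       outs ++ ys.takeWhile (fun p => !pvPG.contains p),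
       ys.any (fun p => pvPG.contains p)) := by
  induction ys generalizing ins outs with
  | nil => simp
  | cons y ys ih =>
    rw [List.foldl_cons]
    by_cases h : pvPG.contains y = true
    · have hstep : pvStepA (ins, outs, false) y = (ins ++ [y], outs, true) := by
        simp only [pvStepA, Bool.false_or, h, Bool.not_true, Bool.false_eq_true, if_false]
      rw [hstep, pvFoldT, List.dropWhile_cons, List.takeWhile_cons]
      simp only [h, Bool.not_true, Bool.false_eq_true, if_false, List.any_cons, Bool.true_or,
        List.append_nil, List.append_assoc, List.singleton_append]
    · simp only [Bool.not_eq_true] at h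
      have hstep : pvStepA (ins, outs, false) y = (ins, outs ++ [y], false) := by
        simp only [pvStepA, Bool.false_or, h, Bool.not_false, if_true]
      rw [hstep, ih, List.dropWhile_cons, List.takeWhile_cons]
      simp only [h, Bool.not_false, if_true, List.any_cons, Bool.false_or,
        List.append_assoc, List.singleton_append]

theorem pvSplitB_eq (ports : List String) :
    pvSplitB ports =
      ((ports.length - (ports.reverse.takeWhile (fun p => !pvPG.contains p)).length : Nat) : Int) := by
  induction ports using List.reverseRecOn with
  | nil => rfl
  | append_singleton xs x ih =>
    have henum : PySem.List.enumerate (xs ++ [x]) 0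
        = PySem.List.enumerate xs 0 ++ [((xs.length : Int), x)] := by
      rw [PySem.List.enumerate_append]
      simp [PySem.List.enumerate_cons, PySem.List.enumerate_nil]
    have hrev : (xs ++ [x]).reverse = x :: xs.reverse := by simp
    unfold pvSplitB at *
    rw [henum, List.foldl_append, List.foldl_cons, List.foldl_nil, hrev, List.takeWhile_cons]
    by_cases h : pvPG.contains x = true
    · simp only [h, if_true, Bool.not_true, Bool.false_eq_true, if_false]
      simp
    · simp only [Bool.not_eq_true] at h
      have happ := congrArg List.length
        (List.takeWhile_append_dropWhile (p := fun p => !pvPG.contains p) (l := xs.reverse))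
      simp only [List.length_append, List.length_reverse] at happ
      simp only [h, Bool.false_eq_true, if_false, Bool.not_false, if_true, ih, List.length_cons,
        List.length_append, List.length_nil]
      congr 1
      omega

theorem pvCore (ports : List String) :
    ((ports.reverse.foldl pvStepA ([], [], false)).1.reverse,
     (ports.reverse.foldl pvStepA ([], [], false)).2.1.reverse)
    = (PySem.List.slice ports none (some (pvSplitB ports)),
       PySem.List.slice ports (some (pvSplitB ports)) none) := by
  rw [pvSplitB_eq, PySem.List.slice_to_natCast, PySem.List.slice_from_natCast, pvFoldF]
  simp only [List.nil_append]
  set T := List.takeWhile (fun p => !pvPG.contains p) ports.reverse with hT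
  set B := List.dropWhile (fun p => !pvPG.contains p) ports.reverse with hB
  have hdecomp : ports = B.reverse ++ T.reverse := by
    conv_lhs => rw [← List.reverse_reverse ports]
    rw [← List.takeWhile_append_dropWhile (p := fun p => !pvPG.contains p) (l := ports.reverse),
      ← hT, ← hB, List.reverse_append]
  have hlen : ports.length - T.length = B.reverse.length := by
    have := congrArg List.length hdecomp
    simp at this
    simp only [List.length_reverse]
    omega
  rw [Prod.mk.injEq]
  constructor
  · rw [hlen]
    conv_rhs => rw [hdecomp]
    rw [List.take_left]
  · rw [hlen]
    conv_rhs => rw [hdecomp]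
    rw [List.drop_left]

-- ===== VERDICT (by name: the statement is the Claim_ definition above) =====
theorem extract_io_from_spice_spec : Claim_equal_extract_io_from_spice := by
  intro content _ _
  unfold Spec_extract_io_from_spice
  unfold extract_io_from_spice extract_io_from_spice_alt
  rw [pvFind_eq]
  cases h : pvSubcktLineB content with
  | none => rfl
  | some subckt =>
    by_cases hlen : (PySem.Str.split₀ subckt).length < 3
    · simp only [hlen, if_true]
    · simp only [hlen, if_false]
      exact pvCore _
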